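-- pv_equiv track=rewrite | github.com/Upendra-Sahu-ML/observability-agent | agents/root_cause_agent/root_cause.py | _extract_cause
-- ===== SOURCE A (Python) =====
-- def _extract_cause(analysis_text):
--     """Extract the main cause from analysis text"""
--     # Simple extraction - look for key phrases
--     lines = analysis_text.split('\n')
--
--     for line in lines:
--         line_lower = line.lower().strip()
--         if any(keyword in line_lower for keyword in ['root cause:', 'identified root cause', 'cause:', 'primary cause']):
--             # Extract the cause after the keyword
--             cause = line.split(':', 1)[-1].strip()
--             if cause and len(cause) > 10:  # Ensure it's substantial
--                 return cause[:200]  # Limit length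
--
--     # Fallback: use first substantial line
--     for line in lines:
--         if len(line.strip()) > 20:
--             return line.strip()[:200]
--
--     return "Root cause analysis completed"
-- ===== SOURCE B (Python) =====
-- def _extract_cause(analysis_text):
--     """Extract the main cause from analysis text"""
--     fallback = None
--     for line in analysis_text.split('\n'):
--         line_lower = line.lower().strip()
--         if any(k in line_lower for k in ('root cause:', 'identified root cause', 'cause:', 'primary cause')):
--             cause = line.split(':', 1)[-1].strip()
--             if cause and len(cause) > 10:
--                 return cause[:200]
--         if fallback is None:
--             stripped = line.strip()
--             if len(stripped) > 20:
--                 fallback = stripped[:200]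
--     return fallback if fallback is not None else "Root cause analysis completed"
-- ===== Notes on version B (the rewrite author's own statement) =====
-- stated objective: alternative
-- what changed: A's two sequential scans over the lines (keyword scan, then a separate fallback scan) are fused into one pass that latches the first substantial line as a fallback while scanning for keywords.
import Mathlib
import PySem

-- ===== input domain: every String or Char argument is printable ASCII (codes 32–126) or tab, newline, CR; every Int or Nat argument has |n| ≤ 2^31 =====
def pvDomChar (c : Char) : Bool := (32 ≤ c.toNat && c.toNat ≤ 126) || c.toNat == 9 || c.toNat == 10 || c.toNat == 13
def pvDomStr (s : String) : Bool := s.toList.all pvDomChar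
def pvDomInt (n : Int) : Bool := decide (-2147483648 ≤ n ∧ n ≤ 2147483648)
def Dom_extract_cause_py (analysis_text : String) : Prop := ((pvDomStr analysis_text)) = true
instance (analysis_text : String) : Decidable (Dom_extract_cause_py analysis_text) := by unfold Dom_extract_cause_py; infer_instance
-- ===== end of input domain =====

-- B fuses A's two sequential scans over the lines into a single pass that latches the fallback line while scanning for keywords (objective: alternative, one traversal instead of two).

-- ===== PORT A =====
-- any(keyword in line_lower for keyword in [...])
def pvKwHitA (line_lower : String) : Bool :=
  ["root cause:", "identified root cause", "cause:", "primary cause"].any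
    (fun keyword => PySem.Str.isIn keyword line_lower)

-- line.split(':', 1)[-1].strip()
def pvCauseA (line : String) : String :=
  PySem.Str.strip (((PySem.Str.splitMax? line ":" 1).getD [line]).getLastD line)

-- A's first loop: returns some result if a keyword line with a substantial cause is found
def pvLoopA1 : List String → Option String
  | [] => none
  | line :: rest =>
    if pvKwHitA (PySem.Str.strip (PySem.Str.lower line)) then
      let cause := pvCauseA line
      if cause ≠ "" && decide (10 < PySem.Str.len cause) then
        some (PySem.Str.slice cause none (some 200))
      else pvLoopA1 rest
    else pvLoopA1 rest

-- A's second loop: first substantial line, else the default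
def pvLoopA2 : List String → String
  | [] => "Root cause analysis completed"
  | line :: rest =>
    if decide (20 < PySem.Str.len (PySem.Str.strip line)) then
      PySem.Str.slice (PySem.Str.strip line) none (some 200)
    else pvLoopA2 rest

def extract_cause_py (analysis_text : String) : String :=
  let lines := (PySem.Str.split? analysis_text "\n").getD [analysis_text]
  match pvLoopA1 lines with
  | some r => r
  | none => pvLoopA2 lines

-- ===== PORT B =====
-- any(k in line_lower for k in (...))
def pvKwHitB (line_lower : String) : Bool :=
  ["root cause:", "identified root cause", "cause:", "primary cause"].any
    (fun k => PySem.Str.isIn k line_lower)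

-- B's single loop, carrying the latched fallback
def pvLoopB (fallback : Option String) : List String → String
  | [] => fallback.getD "Root cause analysis completed"
  | line :: rest =>
    let cause := PySem.Str.strip (((PySem.Str.splitMax? line ":" 1).getD [line]).getLastD line)
    if pvKwHitB (PySem.Str.strip (PySem.Str.lower line)) &&
       (cause ≠ "" && decide (10 < PySem.Str.len cause)) then
      PySem.Str.slice cause none (some 200)
    else
      let fallback' :=
        match fallback with
        | some f => some f
        | none =>
          let stripped := PySem.Str.strip line
          if decide (20 < PySem.Str.len stripped) then
            some (PySem.Str.slice stripped none (some 200))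
          else none
      pvLoopB fallback' rest

def extract_cause_py_alt (analysis_text : String) : String :=
  pvLoopB none ((PySem.Str.split? analysis_text "\n").getD [analysis_text])

-- ===== PRECONDITION & SPEC =====
def Spec_extract_cause_py (analysis_text : String) (out : String) : Prop := out = extract_cause_py_alt analysis_text
instance (analysis_text : String) (out : String) : Decidable (Spec_extract_cause_py analysis_text out) := by unfold Spec_extract_cause_py; infer_instance

-- ===== CLAIM (what is proved, stated in full; the proofs are below) =====
def Claim_equal_extract_cause_py : Prop := ∀ (analysis_text : String), Dom_extract_cause_py analysis_text → Spec_extract_cause_py analysis_text (extract_cause_py analysis_text)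

-- ===== LEMMAS AND PROOFS =====
theorem pvKwHit_eq : pvKwHitA = pvKwHitB := rfl

-- loop invariant: B's fused loop equals A's first scan, falling back to the latched
-- value if one was set, else to A's second scan
set_option maxHeartbeats 1000000 in
theorem pvLoopB_eq (lines : List String) : ∀ fb : Option String,
    pvLoopB fb lines =
      match pvLoopA1 lines with
      | some r => r
      | none => match fb with | some f => f | none => pvLoopA2 lines := by
  induction lines with
  | nil => intro fb; cases fb <;> rfl
  | cons line rest ih =>
    intro fb
    simp only [pvLoopB, pvLoopA1, pvLoopA2, pvCauseA, pvKwHit_eq]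
    by_cases hk : pvKwHitB (PySem.Str.strip (PySem.Str.lower line)) = true <;>
    by_cases hc : (decide (PySem.Str.strip (((PySem.Str.splitMax? line ":" 1).getD [line]).getLastD line) ≠ "") &&
        decide (10 < PySem.Str.len (PySem.Str.strip (((PySem.Str.splitMax? line ":" 1).getD [line]).getLastD line)))) = true <;>
    cases fb <;>
    (try simp at hk) <;> (try simp at hc) <;>
    simp [hk, hc, ih]
    all_goals cases hA : pvLoopA1 rest
    all_goals by_cases h20 : 20 < (PySem.Chars.strip line.toList).length
    all_goals try simp [hA, h20, ih]
    all_goals (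
      have hcond : ¬(¬PySem.Str.strip (((PySem.Str.splitMax? line ":" 1).getD [line]).getLast?.getD line) = "" ∧
          10 < (PySem.Chars.strip (((PySem.Str.splitMax? line ":" 1).getD [line]).getLast?.getD line).toList).length) :=
        fun h => absurd h.2 (not_lt.mpr (hc h.1))
      simp [hcond, hA, h20])

-- ===== VERDICT (by name: the statement is the Claim_ definition above) =====
theorem extract_cause_py_spec : Claim_equal_extract_cause_py := by
  intro s _
  unfold Spec_extract_cause_py extract_cause_py extract_cause_py_alt
  rw [pvLoopB_eq]
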